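-- pv_equiv track=rewrite | github.com/nttkor/programmers | pccp_ex/12체육대회.py | solution
-- ===== SOURCE A (Python) =====
-- from itertools import permutations
--
-- def solution(ability):
--     answer = 0
--     y = len(ability)
--     x = len(ability[0])
--
--     perm = permutations(range(y),x)
--     max = 0
--     for p in perm:
--         sum = 0
--         for i,v in enumerate(p):
--             sum += ability[v][i]
--         if sum > max :
--             max = sum
--     answer = max
--     return answer
-- ===== SOURCE B (Python) =====
-- def solution(ability):
--     y = len(ability)
--     x = len(ability[0])
--     if x > y:
--         return 0
--     dp = {(): 0}
--     for i in range(x):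
--         ndp = {}
--         for used, s in dp.items():
--             for v in range(y):
--                 if v not in used:
--                     t = s + ability[v][i]
--                     key = tuple(sorted(used + (v,)))
--                     if key not in ndp or t > ndp[key]:
--                         ndp[key] = t
--         dp = ndp
--     best = 0
--     for s in dp.values():
--         if s > best:
--             best = s
--     return best
-- ===== Notes on version B (the rewrite author's own statement) =====
-- stated objective: faster
-- what changed: A enumerates all P(y,x) permutations via itertools and sums each; B runs a Held-Karp style dynamic program over columns whose state maps each used-row set (sorted tuple key) to the best partial sum, merging the exponentially many orderings of a row set into one state.
import Mathlib
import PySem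

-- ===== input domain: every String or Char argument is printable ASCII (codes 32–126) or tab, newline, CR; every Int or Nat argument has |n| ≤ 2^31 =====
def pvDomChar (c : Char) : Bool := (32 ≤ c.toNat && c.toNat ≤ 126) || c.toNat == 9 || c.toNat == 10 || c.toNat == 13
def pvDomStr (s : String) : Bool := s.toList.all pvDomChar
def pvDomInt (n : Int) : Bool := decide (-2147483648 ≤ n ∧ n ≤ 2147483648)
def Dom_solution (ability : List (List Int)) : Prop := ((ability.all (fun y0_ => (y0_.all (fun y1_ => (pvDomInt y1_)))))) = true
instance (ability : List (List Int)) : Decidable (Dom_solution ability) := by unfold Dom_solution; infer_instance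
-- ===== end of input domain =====

-- B replaces A's enumeration of all P(y,x) permutations by a bitmask-style DP over columns whose
-- state maps each used-row set (as a sorted tuple) to the best achievable sum (objective: faster).

-- ===== PORT A =====
-- ability[v][i]; exact under Pre_solution (both indices in range there)
def pvVal (ability : List (List Int)) (v i : Int) : Int :=
  ((PySem.List.pyGet? ability v).bind (fun row => PySem.List.pyGet? row i)).getD 0

-- itertools.permutations(pool, r): pick each element of the pool in order for the first slot, recurse
def pvPermsA : Nat → List Int → List (List Int)
  | 0, _ => [[]]
  | r + 1, pool =>
      (List.range pool.length).flatMap (fun k =>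
        (pvPermsA r (pool.eraseIdx k)).map (fun t => pool.getD k 0 :: t))

def solution (ability : List (List Int)) : Int :=
  let y := ability.length
  let x := ((PySem.List.pyGet? ability 0).getD []).length
  let perm := pvPermsA x (PySem.List.pyRange 0 (y : Int))
  perm.foldl (fun mx p =>
    let s := (PySem.List.enumerate p 0).foldl (fun s iv => s + pvVal ability iv.2 iv.1) 0
    if s > mx then s else mx) 0

-- ===== PORT B =====
-- if key not in ndp or t > ndp[key]: ndp[key] = t
def pvMaxUpd (d : PySem.Dict (List Int) Int) (k : List Int) (t : Int) : PySem.Dict (List Int) Int :=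
  match d.get? k with
  | none => d.insert k t
  | some u => if t > u then d.insert k t else d

-- one column i: for used, s in dp.items(): for v in range(y): ...
def pvStep (ability : List (List Int)) (y i : Int) (dp : PySem.Dict (List Int) Int) :
    PySem.Dict (List Int) Int :=
  dp.items.foldl (fun nd q =>
    (PySem.List.pyRange 0 y).foldl (fun nd v =>
      if v ∉ q.1 then
        pvMaxUpd nd (PySem.List.sorted (q.1 ++ [v]) (fun z => z)) (q.2 + pvVal ability v i)
      else nd) nd) PySem.Dict.empty

def solution_alt (ability : List (List Int)) : Int :=
  let y := ability.length
  let x := ((PySem.List.pyGet? ability 0).getD []).length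
  if x > y then 0 else
    let dp := (PySem.List.pyRange 0 (x : Int)).foldl
      (fun dp i => pvStep ability (y : Int) i dp) ((PySem.Dict.empty.insert ([] : List Int) (0 : Int)))
    dp.values.foldl (fun b s => if s > b then s else b) 0

-- ===== PRECONDITION & SPEC =====
-- Pre_ excludes exactly the inputs where Python A raises: the empty list (IndexError on ability[0])
-- and, when x = len(ability[0]) ≤ len(ability) (otherwise no permutation exists and nothing is indexed),
-- any row shorter than x (IndexError on ability[v][i]).
def Pre_solution (ability : List (List Int)) : Prop :=
  ability ≠ [] ∧
    ((ability.headD []).length ≤ ability.length →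
      ∀ row ∈ ability, (ability.headD []).length ≤ row.length)
instance (ability : List (List Int)) : Decidable (Pre_solution ability) := by
  unfold Pre_solution; infer_instance

def pvWitness_solution : List (List Int) := [[5, 2], [1, 7], [3, 3]]

def Spec_solution (ability : List (List Int)) (out : Int) : Prop := out = solution_alt ability
instance (ability : List (List Int)) (out : Int) : Decidable (Spec_solution ability out) := by
  unfold Spec_solution; infer_instance

-- ===== CLAIM (what is proved, stated in full; the proofs are below) =====
def Claim_equal_solution : Prop := ∀ (ability : List (List Int)), Dom_solution ability → Pre_solution ability → Spec_solution ability (solution ability)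

-- ===== LEMMAS AND PROOFS =====

-- ---- Int fold-max toolbox ----
theorem pv_if_eq_max (m s : Int) : (if s > m then s else m) = max m s := by
  rw [max_def]; split_ifs <;> omega

theorem pv_foldl_if_eq_max (l : List Int) (c : Int) :
    l.foldl (fun m s => if s > m then s else m) c = l.foldl max c := by
  induction l generalizing c with
  | nil => rfl
  | cons s l ih => rw [List.foldl_cons, List.foldl_cons, pv_if_eq_max, ih]

theorem pv_le_foldl_max (l : List Int) (c : Int) : c ≤ l.foldl max c := by
  induction l generalizing c with
  | nil => simp
  | cons s l ih => exact le_trans (le_max_left c s) (ih (max c s))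

theorem pv_mem_le_foldl_max (l : List Int) (c t : Int) (h : t ∈ l) : t ≤ l.foldl max c := by
  induction l generalizing c with
  | nil => simp at h
  | cons s l ih =>
      rcases List.mem_cons.mp h with rfl | h
      · exact le_trans (le_max_right c t) (pv_le_foldl_max l _)
      · exact ih _ h

theorem pv_foldl_max_mem (l : List Int) (c : Int) : l.foldl max c = c ∨ l.foldl max c ∈ l := by
  induction l generalizing c with
  | nil => left; rfl
  | cons s l ih =>
      rcases ih (max c s) with h | h
      · rcases max_choice c s with hc | hc
        · left; rw [List.foldl_cons, h, hc]
        · right; rw [List.foldl_cons, h, hc]; exact List.mem_cons_self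
      · right; exact List.mem_cons_of_mem _ h

theorem pv_foldl_max_congr (c : Int) (l1 l2 : List Int)
    (h1 : ∀ t ∈ l1, ∃ u ∈ l2, t ≤ u) (h2 : ∀ t ∈ l2, ∃ u ∈ l1, t ≤ u) :
    l1.foldl max c = l2.foldl max c := by
  apply le_antisymm
  · rcases pv_foldl_max_mem l1 c with h | h
    · rw [h]; exact pv_le_foldl_max _ _
    · obtain ⟨u, hu, htu⟩ := h1 _ h
      exact le_trans htu (pv_mem_le_foldl_max _ _ _ hu)
  · rcases pv_foldl_max_mem l2 c with h | h
    · rw [h]; exact pv_le_foldl_max _ _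
    · obtain ⟨u, hu, htu⟩ := h2 _ h
      exact le_trans htu (pv_mem_le_foldl_max _ _ _ hu)

-- ---- Option-valued max (running max of the values hit by a key) ----
def pvOMax (o : Option Int) (s : Int) : Option Int :=
  some (match o with | none => s | some m => max m s)

def pvGMax (l : List Int) : Option Int := l.foldl pvOMax none

theorem pv_foldl_omax_some (l : List Int) (m : Int) :
    l.foldl pvOMax (some m) = some (l.foldl max m) := by
  induction l generalizing m with
  | nil => rfl
  | cons s l ih => simp [List.foldl_cons, pvOMax, ih]

theorem pv_gmax_cons (s : Int) (l : List Int) : pvGMax (s :: l) = some (l.foldl max s) := by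
  simp [pvGMax, List.foldl_cons, pvOMax, pv_foldl_omax_some]

theorem pv_gmax_mem (l : List Int) (m : Int) (h : pvGMax l = some m) : m ∈ l := by
  cases l with
  | nil => simp [pvGMax] at h
  | cons s l =>
      rw [pv_gmax_cons] at h
      simp only [Option.some.injEq] at h
      rcases pv_foldl_max_mem l s with h' | h'
      · exact List.mem_cons.mpr (Or.inl (by omega))
      · exact List.mem_cons.mpr (Or.inr (h ▸ h'))

theorem pv_le_gmax (l : List Int) (t m : Int) (ht : t ∈ l) (h : pvGMax l = some m) : t ≤ m := by
  cases l with
  | nil => simp at ht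
  | cons s l =>
      rw [pv_gmax_cons] at h
      simp only [Option.some.injEq] at h
      subst h
      rcases List.mem_cons.mp ht with rfl | ht
      · exact pv_le_foldl_max _ _
      · exact pv_mem_le_foldl_max _ _ _ ht

theorem pv_gmax_congr (l1 l2 : List Int)
    (h1 : ∀ t ∈ l1, ∃ u ∈ l2, t ≤ u) (h2 : ∀ t ∈ l2, ∃ u ∈ l1, t ≤ u) :
    pvGMax l1 = pvGMax l2 := by
  cases l1 with
  | nil =>
      cases l2 with
      | nil => rfl
      | cons u l2 => obtain ⟨w, hw, _⟩ := h2 u List.mem_cons_self; simp at hw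
  | cons s l1 =>
      cases l2 with
      | nil => obtain ⟨w, hw, _⟩ := h1 s List.mem_cons_self; simp at hw
      | cons u l2 =>
          rw [pv_gmax_cons, pv_gmax_cons]
          congr 1
          apply le_antisymm
          · rcases pv_foldl_max_mem l1 s with h | h
            · obtain ⟨w, hw, hsw⟩ := h1 s List.mem_cons_self
              rw [h]
              exact le_trans hsw (pv_le_gmax _ _ _ hw (pv_gmax_cons u l2))
            · obtain ⟨w, hw, hsw⟩ := h1 _ (List.mem_cons_of_mem _ h)
              exact le_trans hsw (pv_le_gmax _ _ _ hw (pv_gmax_cons u l2))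
          · rcases pv_foldl_max_mem l2 u with h | h
            · obtain ⟨w, hw, hsw⟩ := h2 u List.mem_cons_self
              rw [h]
              exact le_trans hsw (pv_le_gmax _ _ _ hw (pv_gmax_cons s l1))
            · obtain ⟨w, hw, hsw⟩ := h2 _ (List.mem_cons_of_mem _ h)
              exact le_trans hsw (pv_le_gmax _ _ _ hw (pv_gmax_cons s l1))

-- ---- scores ----
def pvScore (a : List (List Int)) : Int → List Int → Int
  | _, [] => 0
  | c, v :: t => pvVal a v c + pvScore a (c + 1) t

theorem pv_score_port (a : List (List Int)) (p : List Int) (c acc : Int) :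
    (PySem.List.enumerate p c).foldl (fun s iv => s + pvVal a iv.2 iv.1) acc
      = acc + pvScore a c p := by
  induction p generalizing c acc with
  | nil => simp [PySem.List.enumerate_nil, pvScore]
  | cons v t ih => rw [PySem.List.enumerate_cons]; simp [List.foldl_cons, pvScore, ih]; ring

theorem pv_score_append (a : List (List Int)) (p : List Int) (v c : Int) :
    pvScore a c (p ++ [v]) = pvScore a c p + pvVal a v (c + p.length) := by
  induction p generalizing c with
  | nil => simp [pvScore]
  | cons w t ih => simp [pvScore, ih]; ring

-- ---- the abstract permutation list built column by column (extend at the back) ----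
def pvPP (y : Int) : Nat → List (List Int)
  | 0 => [[]]
  | n + 1 => (pvPP y n).flatMap (fun p =>
      ((PySem.List.pyRange 0 y).filter (fun v => v ∉ p)).map (fun v => p ++ [v]))

theorem pv_mem_PP_succ (y : Int) (n : Nat) (p' : List Int) :
    p' ∈ pvPP y (n + 1) ↔ ∃ p ∈ pvPP y n, ∃ v : Int, (0 ≤ v ∧ v < y) ∧ v ∉ p ∧ p' = p ++ [v] := by
  simp [pvPP, List.mem_flatMap, List.mem_map, List.mem_filter,
    PySem.List.mem_pyRange_one]
  constructor
  · rintro ⟨p, hp, v, ⟨⟨hv1, hv2⟩, hnv⟩, rfl⟩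
    exact ⟨p, hp, v, ⟨⟨hv1, hv2⟩, by simpa using hnv, rfl⟩⟩
  · rintro ⟨p, hp, v, ⟨hv, hnv, rfl⟩⟩
    exact ⟨p, hp, v, ⟨⟨hv.1, hv.2⟩, by simpa using hnv⟩, rfl⟩

theorem pv_PP_char (y : Int) (n : Nat) (p : List Int) :
    p ∈ pvPP y n ↔ p.length = n ∧ p.Nodup ∧ ∀ v ∈ p, 0 ≤ v ∧ v < y := by
  induction n generalizing p with
  | zero =>
      constructor
      · rintro h; simp [pvPP] at h; subst h; simp
      · rintro ⟨h, _, _⟩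
        rw [List.length_eq_zero_iff] at h; subst h; simp [pvPP]
  | succ n ih =>
      rw [pv_mem_PP_succ]
      constructor
      · rintro ⟨q, hq, v, hv, hnv, rfl⟩
        obtain ⟨hlen, hnd, hbd⟩ := ih q |>.mp hq
        refine ⟨by simp [hlen], ?_, ?_⟩
        · rw [List.nodup_append]
          refine ⟨hnd, List.nodup_singleton v, ?_⟩
          intro w hw b hb
          rw [List.mem_singleton] at hb
          subst hb
          exact fun h => hnv (h ▸ hw)
        · intro w hw
          rcases List.mem_append.mp hw with hw | hw
          · exact hbd w hw
          · simp at hw; subst hw; exact hv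
      · rintro ⟨hlen, hnd, hbd⟩
        have hne : p ≠ [] := by intro h; subst h; simp at hlen
        obtain ⟨q, v, rfl⟩ : ∃ q v, p = q ++ [v] := by
          rcases List.eq_nil_or_concat p with h | ⟨q, v, h⟩
          · exact absurd h hne
          · exact ⟨q, v, by rw [h, List.concat_eq_append]⟩
        have hq : q.Nodup ∧ v ∉ q := by
          rw [List.nodup_append] at hnd
          exact ⟨hnd.1, fun hvq => hnd.2.2 v hvq v (List.mem_singleton.mpr rfl) rfl⟩
        refine ⟨q, ih q |>.mpr ⟨by simp at hlen; omega, hq.1, fun w hw => hbd w (List.mem_append_left _ hw)⟩,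
          v, hbd v (by simp), hq.2, rfl⟩

-- ---- characterise port A's permutation generator ----
theorem pv_permsA_char (r : Nat) (pool : List Int) (hnd : pool.Nodup) (p : List Int) :
    p ∈ pvPermsA r pool ↔ p.length = r ∧ p.Nodup ∧ ∀ v ∈ p, v ∈ pool := by
  induction r generalizing pool p with
  | zero =>
      constructor
      · rintro h; simp [pvPermsA] at h; subst h; simp
      · rintro ⟨h, _, _⟩
        rw [List.length_eq_zero_iff] at h; subst h; simp [pvPermsA]
  | succ r ih =>
      simp only [pvPermsA, List.mem_flatMap, List.mem_map, List.mem_range]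
      constructor
      · rintro ⟨k, hk, t, ht, rfl⟩
        have hndk : (pool.eraseIdx k).Nodup := (List.eraseIdx_sublist pool k).nodup hnd
        obtain ⟨hlen, hnd', hbd⟩ := (ih (pool.eraseIdx k) hndk t).mp ht
        have hget : pool.getD k 0 = pool[k] := List.getD_eq_getElem pool 0 hk
        have hmemk : pool[k] ∈ pool := List.getElem_mem hk
        have hknot : pool[k] ∉ pool.eraseIdx k := by
          intro hmem
          obtain ⟨i, hi, hik, hieq⟩ := List.mem_eraseIdx_iff_getElem.mp hmem
          exact hik (hnd.getElem_inj_iff.mp hieq)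
        refine ⟨by simp [hlen], ?_, ?_⟩
        · rw [List.nodup_cons]
          refine ⟨?_, hnd'⟩
          rw [hget]
          intro h
          exact hknot (hbd _ h)
        · intro w hw
          rcases List.mem_cons.mp hw with rfl | hw
          · rw [hget]; exact hmemk
          · exact (List.eraseIdx_sublist pool k).mem (hbd w hw)
      · rintro ⟨hlen, hnd', hbd⟩
        cases p with
        | nil => simp at hlen
        | cons v t =>
            have hv : v ∈ pool := hbd v List.mem_cons_self
            have hk : pool.idxOf v < pool.length := List.idxOf_lt_length_of_mem hv
            refine ⟨pool.idxOf v, hk, t, ?_, ?_⟩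
            · have herase : pool.eraseIdx (pool.idxOf v) = pool.erase v :=
                List.eraseIdx_idxOf_eq_erase v pool
              rw [List.nodup_cons] at hnd'
              apply (ih _ ((List.eraseIdx_sublist pool _).nodup hnd) t).mpr
              refine ⟨by simpa using hlen, hnd'.2, ?_⟩
              intro w hw
              rw [herase, List.mem_erase_of_ne ?_]
              · exact hbd w (List.mem_cons_of_mem _ hw)
              · intro h; subst h; exact hnd'.1 hw
            · congr 1
              rw [List.getD_eq_getElem pool 0 hk]
              exact List.getElem_idxOf hk
  
-- the two enumerations contain the same permutations
theorem pv_permsA_eq_PP_mem (y : Int) (x : Nat) (p : List Int) :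
    p ∈ pvPermsA x (PySem.List.pyRange 0 y) ↔ p ∈ pvPP y x := by
  rw [pv_permsA_char x _ (PySem.List.nodup_pyRange_one 0 y), pv_PP_char]
  constructor
  · rintro ⟨h1, h2, h3⟩
    refine ⟨h1, h2, fun v hv => ?_⟩
    have := h3 v hv; rw [PySem.List.mem_pyRange_one] at this; omega
  · rintro ⟨h1, h2, h3⟩
    refine ⟨h1, h2, fun v hv => ?_⟩
    rw [PySem.List.mem_pyRange_one]; have := h3 v hv; omega

-- permutations(range(y), x) is empty when x > y
theorem pv_permsA_nil (r : Nat) (pool : List Int) (h : pool.length < r) :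
    pvPermsA r pool = [] := by
  induction r generalizing pool with
  | zero => omega
  | succ r ih =>
      simp only [pvPermsA]
      apply List.flatMap_eq_nil_iff.mpr
      intro k hk
      rw [List.mem_range] at hk
      rw [ih _ (by rw [List.length_eraseIdx_of_lt hk]; omega)]
      simp

-- ---- DP invariant ----
def pvSKey (p : List Int) : List Int := PySem.List.sorted p (fun z => z)

def pvGroupScores (a : List (List Int)) (y : Int) (n : Nat) (k : List Int) : List Int :=
  ((pvPP y n).filter (fun p => pvSKey p = k)).map (pvScore a 0)

def pvInv (a : List (List Int)) (y : Int) (n : Nat) (dp : PySem.Dict (List Int) Int) : Prop :=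
  dp.keys.Nodup ∧ ∀ k, dp.get? k = pvGMax (pvGroupScores a y n k)

-- fold with an 'if' filter = fold over the filtered, mapped list
theorem pv_foldl_if_filter_map (l : List Int) (pr : Int → Prop) [DecidablePred pr]
    (fk : Int → List Int) (fv : Int → Int) (d : PySem.Dict (List Int) Int) :
    l.foldl (fun nd v => if pr v then pvMaxUpd nd (fk v) (fv v) else nd) d
      = ((l.filter (fun v => decide (pr v))).map (fun v => (fk v, fv v))).foldl
          (fun nd q => pvMaxUpd nd q.1 q.2) d := by
  induction l generalizing d with
  | nil => rfl
  | cons v l ih =>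
      by_cases h : pr v <;> simp [List.foldl_cons, h, ih]

def pvContrib (a : List (List Int)) (y i : Int) (items : List (List Int × Int)) :
    List (List Int × Int) :=
  items.flatMap (fun q =>
    ((PySem.List.pyRange 0 y).filter (fun v => v ∉ q.1)).map
      (fun v => (pvSKey (q.1 ++ [v]), q.2 + pvVal a v i)))

theorem pv_foldl_congr {α β : Type} (l : List α) (f g : β → α → β) (d : β)
    (h : ∀ b : β, ∀ a ∈ l, f b a = g b a) : l.foldl f d = l.foldl g d := by
  induction l generalizing d with
  | nil => rfl
  | cons a l ih =>
      rw [List.foldl_cons, List.foldl_cons, h d a List.mem_cons_self]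
      exact ih _ (fun b a' ha' => h b a' (List.mem_cons_of_mem _ ha'))

theorem pv_step_eq_fold_contrib (a : List (List Int)) (y i : Int)
    (dp : PySem.Dict (List Int) Int) :
    pvStep a y i dp
      = (pvContrib a y i dp.items).foldl (fun nd q => pvMaxUpd nd q.1 q.2) PySem.Dict.empty := by
  unfold pvStep pvContrib
  rw [List.foldl_flatMap]
  apply pv_foldl_congr
  intro d q _
  exact pv_foldl_if_filter_map (PySem.List.pyRange 0 y) (fun v => v ∉ q.1)
    (fun v => pvSKey (q.1 ++ [v])) (fun v => q.2 + pvVal a v i) d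

theorem pv_maxUpd_nodup (d : PySem.Dict (List Int) Int) (k : List Int) (t : Int)
    (h : d.keys.Nodup) : (pvMaxUpd d k t).keys.Nodup := by
  unfold pvMaxUpd
  cases d.get? k with
  | none => exact PySem.Dict.nodup_keys_insert d k t h
  | some u =>
      by_cases ht : t > u
      · simp only [ht, if_true]; exact PySem.Dict.nodup_keys_insert d k t h
      · simpa [ht] using h

theorem pv_foldl_maxUpd_nodup (L : List (List Int × Int)) (d : PySem.Dict (List Int) Int)
    (h : d.keys.Nodup) :
    (L.foldl (fun nd q => pvMaxUpd nd q.1 q.2) d).keys.Nodup := by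
  induction L generalizing d with
  | nil => exact h
  | cons q L ih => exact ih _ (pv_maxUpd_nodup _ _ _ h)

theorem pv_maxUpd_get? (d : PySem.Dict (List Int) Int) (k k' : List Int) (t : Int) :
    (pvMaxUpd d k t).get? k' = if k' = k then pvOMax (d.get? k) t else d.get? k' := by
  by_cases hk : k' = k
  · subst hk
    cases h : d.get? k' with
    | none =>
        rw [if_pos rfl, show pvMaxUpd d k' t = d.insert k' t by unfold pvMaxUpd; rw [h],
          PySem.Dict.get?_insert_self]
        rfl
    | some u =>
        rw [if_pos rfl,
          show pvMaxUpd d k' t = if t > u then d.insert k' t else d by unfold pvMaxUpd; rw [h]]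
        by_cases ht : t > u
        · rw [if_pos ht, PySem.Dict.get?_insert_self,
            show pvOMax (some u) t = some (max u t) from rfl, max_eq_right (by omega)]
        · rw [if_neg ht, h,
            show pvOMax (some u) t = some (max u t) from rfl, max_eq_left (by omega)]
  · rw [if_neg hk]
    cases h : d.get? k with
    | none =>
        rw [show pvMaxUpd d k t = d.insert k t by unfold pvMaxUpd; rw [h]]
        exact PySem.Dict.get?_insert_of_ne d t hk
    | some u =>
        rw [show pvMaxUpd d k t = if t > u then d.insert k t else d by unfold pvMaxUpd; rw [h]]
        by_cases ht : t > u
        · rw [if_pos ht]; exact PySem.Dict.get?_insert_of_ne d t hk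
        · rw [if_neg ht]

theorem pv_foldl_maxUpd_get? (L : List (List Int × Int)) (d : PySem.Dict (List Int) Int)
    (k : List Int) :
    (L.foldl (fun nd q => pvMaxUpd nd q.1 q.2) d).get? k
      = ((L.filter (fun q => q.1 = k)).map (fun q => q.2)).foldl pvOMax (d.get? k) := by
  induction L generalizing d with
  | nil => rfl
  | cons q L ih =>
      rw [List.foldl_cons, ih, pv_maxUpd_get?]
      by_cases hk : q.1 = k
      · rw [if_pos hk.symm, hk]
        simp [hk]
      · rw [if_neg (fun h => hk h.symm)]
        simp [hk]

-- sorted key is invariant under permutation of the list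
theorem pv_skey_perm (p q : List Int) (h : p.Perm q) : pvSKey p = pvSKey q :=
  PySem.List.sorted_eq_sorted_of_perm p q (fun z => z) (fun _ _ h => h) h

-- ---- the step preserves the invariant ----
theorem pv_step_inv (a : List (List Int)) (y : Int) (n : Nat)
    (dp : PySem.Dict (List Int) Int) (h : pvInv a y n dp) :
    pvInv a y (n + 1) (pvStep a y (n : Int) dp) := by
  obtain ⟨hnd, hget⟩ := h
  rw [pv_step_eq_fold_contrib]
  constructor
  · exact pv_foldl_maxUpd_nodup _ _ (by simp [PySem.Dict.keys_empty])
  intro k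
  rw [pv_foldl_maxUpd_get?, PySem.Dict.get?_empty]
  show pvGMax _ = pvGMax _
  apply pv_gmax_congr
  · -- every contribution for key k is (hence is dominated by) a score of the (n+1)-group
    intro t ht
    rw [List.mem_map] at ht
    obtain ⟨q', hq', rfl⟩ := ht
    rw [List.mem_filter, decide_eq_true_eq] at hq'
    obtain ⟨hqc, hqk⟩ := hq'
    unfold pvContrib at hqc
    rw [List.mem_flatMap] at hqc
    obtain ⟨q, hq, hq'mem⟩ := hqc
    rw [List.mem_map] at hq'mem
    obtain ⟨v, hvf, hq'eq⟩ := hq'mem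
    rw [List.mem_filter, decide_eq_true_eq, PySem.List.mem_pyRange_one] at hvf
    obtain ⟨hvr, hvq⟩ := hvf
    subst hq'eq
    simp only at hqk
    -- q.2 is attained by some permutation p in group q.1
    have hq2 : pvGMax (pvGroupScores a y n q.1) = some q.2 := by
      rw [← hget]
      exact PySem.Dict.get?_of_mem_items dp (by exact hq) hnd
    have hq2mem := pv_gmax_mem _ _ hq2
    unfold pvGroupScores at hq2mem
    rw [List.mem_map] at hq2mem
    obtain ⟨p, hpf, hscore⟩ := hq2mem
    rw [List.mem_filter, decide_eq_true_eq] at hpf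
    obtain ⟨hpPP, hpkey⟩ := hpf
    obtain ⟨hplen, hpnd, hpbd⟩ := (pv_PP_char y n p).mp hpPP
    have hperm : p.Perm q.1 := by rw [← hpkey]; exact (PySem.List.sorted_perm p _ _).symm
    have hvp : v ∉ p := fun hme => hvq (hperm.mem_iff.mp hme)
    refine ⟨pvScore a 0 (p ++ [v]), ?_, ?_⟩
    · unfold pvGroupScores
      rw [List.mem_map]
      refine ⟨p ++ [v], ?_, rfl⟩
      rw [List.mem_filter, decide_eq_true_eq]
      constructor
      · exact (pv_mem_PP_succ y n _).mpr ⟨p, hpPP, v, hvr, hvp, rfl⟩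
      · rw [← hqk]
        exact pv_skey_perm _ _ (hperm.append_right [v])
    · rw [pv_score_append, hscore, hplen, zero_add]
  · -- every score of the (n+1)-group is dominated by a contribution for key k
    intro t ht
    unfold pvGroupScores at ht
    rw [List.mem_map] at ht
    obtain ⟨p', hpf, rfl⟩ := ht
    rw [List.mem_filter, decide_eq_true_eq] at hpf
    obtain ⟨hp'PP, hp'key⟩ := hpf
    obtain ⟨p, hpPP, v, hv, hvp, rfl⟩ := (pv_mem_PP_succ y n p').mp hp'PP
    obtain ⟨hplen, hpnd, hpbd⟩ := (pv_PP_char y n p).mp hpPP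
    have hpmem : pvScore a 0 p ∈ pvGroupScores a y n (pvSKey p) := by
      unfold pvGroupScores
      rw [List.mem_map]
      refine ⟨p, ?_, rfl⟩
      rw [List.mem_filter, decide_eq_true_eq]
      exact ⟨hpPP, rfl⟩
    obtain ⟨m, hm⟩ : ∃ m, pvGMax (pvGroupScores a y n (pvSKey p)) = some m := by
      cases hl : pvGroupScores a y n (pvSKey p) with
      | nil => rw [hl] at hpmem; simp at hpmem
      | cons s l => rw [pv_gmax_cons]; exact ⟨_, rfl⟩
    have hle : pvScore a 0 p ≤ m := pv_le_gmax _ _ _ hpmem hm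
    have hitems : (pvSKey p, m) ∈ dp.items :=
      PySem.Dict.mem_items_of_get?_eq_some dp (by rw [hget, hm])
    have hperm : (pvSKey p).Perm p := PySem.List.sorted_perm p _ _
    refine ⟨m + pvVal a v (n : Int), ?_, ?_⟩
    · rw [List.mem_map]
      refine ⟨(pvSKey (pvSKey p ++ [v]), m + pvVal a v (n : Int)), ?_, rfl⟩
      rw [List.mem_filter, decide_eq_true_eq]
      constructor
      · unfold pvContrib
        rw [List.mem_flatMap]
        refine ⟨(pvSKey p, m), hitems, ?_⟩
        rw [List.mem_map]
        refine ⟨v, ?_, rfl⟩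
        rw [List.mem_filter, decide_eq_true_eq, PySem.List.mem_pyRange_one]
        exact ⟨⟨hv.1, hv.2⟩, fun hme => hvp (hperm.mem_iff.mp hme)⟩
      · show pvSKey (pvSKey p ++ [v]) = k
        rw [← hp'key]
        exact pv_skey_perm _ _ (hperm.append_right [v])
    · rw [pv_score_append, hplen, zero_add]
      exact add_le_add hle le_rfl

-- ---- iterate the step over range(x) ----
def pvDPn (a : List (List Int)) (y : Int) : Nat → PySem.Dict (List Int) Int
  | 0 => (PySem.Dict.empty.insert ([] : List Int) (0 : Int))
  | n + 1 => pvStep a y (n : Int) (pvDPn a y n)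

theorem pv_foldl_range_eq_DPn (a : List (List Int)) (y : Int) (x : Nat) :
    (PySem.List.pyRange 0 (x : Int)).foldl (fun dp i => pvStep a y i dp)
        (PySem.Dict.empty.insert ([] : List Int) (0 : Int)) = pvDPn a y x := by
  induction x with
  | zero =>
      rw [show ((0 : Nat) : Int) = 0 from rfl, PySem.List.pyRange_one_eq_nil le_rfl]
      rfl
  | succ n ih =>
      rw [show ((n + 1 : Nat) : Int) = (n : Int) + 1 by push_cast; ring,
        PySem.List.pyRange_one_succ_right (by positivity), List.foldl_append, ih]
      rfl

theorem pv_inv_zero (a : List (List Int)) (y : Int) : pvInv a y 0 (pvDPn a y 0) := by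
  constructor
  · exact PySem.Dict.nodup_keys_insert _ _ _ (by simp [PySem.Dict.keys_empty])
  intro k
  by_cases hk : k = ([] : List Int)
  · subst hk
    show (PySem.Dict.empty.insert ([] : List Int) (0 : Int)).get? [] = _
    rw [PySem.Dict.get?_insert_self]
    rfl
  · have h1 : (pvDPn a y 0).get? k = none := by
      show (PySem.Dict.empty.insert ([] : List Int) (0 : Int)).get? k = none
      rw [PySem.Dict.get?_insert_of_ne _ _ hk, PySem.Dict.get?_empty]
    rw [h1]
    have h2 : pvGroupScores a y 0 k = [] := by
      unfold pvGroupScores pvPP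
      rw [List.filter_cons_of_neg, List.filter_nil, List.map_nil]
      simp only [decide_eq_true_eq]
      intro h
      exact hk (h ▸ rfl)
    rw [h2]
    rfl

theorem pv_inv_n (a : List (List Int)) (y : Int) (n : Nat) : pvInv a y n (pvDPn a y n) := by
  induction n with
  | zero => exact pv_inv_zero a y
  | succ n ih => exact pv_step_inv a y n _ ih

-- ---- tie it together ----
theorem pv_values_items (dp : PySem.Dict (List Int) Int) : dp.values = dp.items.map (·.2) := rfl

theorem solution_eq_max_PP (a : List (List Int)) :
    solution a = ((pvPP (a.length : Int) ((PySem.List.pyGet? a 0).getD []).length).map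
      (pvScore a 0)).foldl max 0 := by
  show (pvPermsA _ _).foldl _ 0 = _
  have h1 : ∀ (l : List (List Int)) (c : Int),
      l.foldl (fun mx p =>
        let s := (PySem.List.enumerate p 0).foldl (fun s iv => s + pvVal a iv.2 iv.1) 0
        if s > mx then s else mx) c = (l.map (pvScore a 0)).foldl max c := by
    intro l c
    rw [List.foldl_map]
    apply pv_foldl_congr
    intro m p _
    show (if _ > m then _ else m) = max m (pvScore a 0 p)
    rw [pv_score_port a p 0 0, zero_add, pv_if_eq_max]
  rw [h1]
  apply pv_foldl_max_congr
  · intro t ht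
    refine ⟨t, ?_, le_refl t⟩
    simp only [List.mem_map] at ht ⊢
    obtain ⟨p, hp, rfl⟩ := ht
    exact ⟨p, (pv_permsA_eq_PP_mem _ _ p).mp hp, rfl⟩
  · intro t ht
    refine ⟨t, ?_, le_refl t⟩
    simp only [List.mem_map] at ht ⊢
    obtain ⟨p, hp, rfl⟩ := ht
    exact ⟨p, (pv_permsA_eq_PP_mem _ _ p).mpr hp, rfl⟩

theorem pv_main (a : List (List Int)) : solution a = solution_alt a := by
  set y := a.length with hy
  set x := ((PySem.List.pyGet? a 0).getD []).length with hx
  show solution a = _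
  by_cases hxy : x > y
  · -- no permutation of length x exists; both sides are 0
    have hA : solution a = 0 := by
      show (pvPermsA x (PySem.List.pyRange 0 (y : Int))).foldl _ 0 = 0
      rw [pv_permsA_nil x _ (by rw [PySem.List.length_pyRange_one]; omega)]
      rfl
    have hB : solution_alt a = 0 := by
      show (if x > y then (0 : Int) else _) = 0
      simp [hxy]
    rw [hA, hB]
  · have hB : solution_alt a
        = ((pvDPn a (y : Int) x).values).foldl max 0 := by
      show (if x > y then (0 : Int) else _) = _
      rw [if_neg hxy, pv_foldl_range_eq_DPn, pv_foldl_if_eq_max]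
    rw [hB, solution_eq_max_PP]
    obtain ⟨hnd, hget⟩ := pv_inv_n a (y : Int) x
    apply pv_foldl_max_congr
    · -- each score is dominated by the dict value at its key
      intro t ht
      simp only [List.mem_map] at ht
      obtain ⟨p, hp, rfl⟩ := ht
      have hmem : pvScore a 0 p ∈ pvGroupScores a (y : Int) x (pvSKey p) := by
        simp only [pvGroupScores, List.mem_map, List.mem_filter, decide_eq_true_eq]
        exact ⟨p, ⟨hp, rfl⟩, rfl⟩
      obtain ⟨m, hm⟩ : ∃ m, pvGMax (pvGroupScores a (y : Int) x (pvSKey p)) = some m := by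
        cases hg : pvGMax (pvGroupScores a (y : Int) x (pvSKey p)) with
        | none =>
            exfalso
            cases hl : pvGroupScores a (y : Int) x (pvSKey p) with
            | nil => rw [hl] at hmem; simp at hmem
            | cons s l => rw [hl, pv_gmax_cons] at hg; simp at hg
        | some m => exact ⟨m, rfl⟩
      refine ⟨m, ?_, pv_le_gmax _ _ _ hmem hm⟩
      rw [pv_values_items]
      simp only [List.mem_map]
      exact ⟨(pvSKey p, m), PySem.Dict.mem_items_of_get?_eq_some _ (by rw [hget, hm]), rfl⟩
    · -- each dict value is itself a score
      intro t ht
      rw [pv_values_items, List.mem_map] at ht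
      obtain ⟨q, hkt, rfl⟩ := ht
      have hsome : (pvDPn a (y : Int) x).get? q.1 = some q.2 :=
        PySem.Dict.get?_of_mem_items _ (by exact hkt) hnd
      rw [hget] at hsome
      have hmem := pv_gmax_mem _ _ hsome
      unfold pvGroupScores at hmem
      rw [List.mem_map] at hmem
      obtain ⟨p, hpf, hscore⟩ := hmem
      rw [List.mem_filter] at hpf
      exact ⟨q.2, by rw [List.mem_map]; exact ⟨p, hpf.1, hscore⟩, le_refl _⟩

-- ===== VERDICT (by name: the statement is the Claim_ definition above) =====
theorem solution_spec : Claim_equal_solution := by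
  intro ability _ _
  show solution ability = solution_alt ability
  exact pv_main ability
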